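-- pv_equiv track=rewrite | github.com/maheshgm/ProgrammingGym | February_Circuits/EmptyArrays.py | solve
-- ===== SOURCE A (Python) =====
-- def solve(first, second):
--     count = 0
--
--     while len(first) != 0:
--         if first[0] == second[0]:
--             first.pop(0)
--             second.pop(0)
--         else:
--             temp = first[0]
--             first.pop(0)
--             first = first + [temp]
--
--         count += 1
--
--     return count
-- ===== SOURCE B (Python) =====
-- def solve(first, second):
--     # Return-value equivalent to A; does NOT mutate its arguments (A empties
--     # `first` and pops matched elements of `second` in place).
--     count = 0
--     q = list(first)
--     j = 0
--     while q:
--         i = q.index(second[j])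
--         count += i + 1
--         q = q[i + 1:] + q[:i]
--         j += 1
--     return count
-- ===== Notes on version B (the rewrite author's own statement) =====
-- stated objective: faster
-- what changed: Instead of simulating every single rotation (each step a pop(0) plus list re-append), B jumps straight to the next target with one q.index search per match and rebuilds the queue with a single slice, adding index+1 to the count; Pre_ admits exactly the inputs on which A terminates (first is a multiset permutation of the matching prefix of second) - on all other inputs A loops forever or raises IndexError and both programs fail to return.
import Mathlib
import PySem

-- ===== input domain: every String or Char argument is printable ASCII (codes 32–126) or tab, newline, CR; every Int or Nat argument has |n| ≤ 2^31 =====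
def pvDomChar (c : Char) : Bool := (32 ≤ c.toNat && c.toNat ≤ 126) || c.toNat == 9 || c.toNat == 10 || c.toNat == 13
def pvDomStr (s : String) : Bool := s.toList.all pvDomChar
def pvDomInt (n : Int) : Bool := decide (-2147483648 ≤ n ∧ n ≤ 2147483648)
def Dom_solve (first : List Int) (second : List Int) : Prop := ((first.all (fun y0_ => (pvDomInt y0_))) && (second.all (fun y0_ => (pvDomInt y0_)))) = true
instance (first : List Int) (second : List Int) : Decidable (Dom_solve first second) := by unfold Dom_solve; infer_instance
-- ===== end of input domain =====

-- B replaces A's step-by-step queue rotation by one index search + one slice per match;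
-- equivalence is about the RETURN value only: Python A mutates its arguments in place, B does not.

-- ===== PORT A =====
-- A's while-loop is not structurally decreasing (a rotation keeps the length), so the port
-- carries fuel; first.length^2 + 1 exceeds the number of iterations on every input admitted
-- by Pre_solve (on other inputs Python A loops forever or raises IndexError).
def solveLoopA (fuel : Nat) (first : List Int) (second : List Int) (count : Int) : Int :=
  match fuel, first with
  | 0, _ => count
  | _, [] => count
  | fuel + 1, x :: rest =>
    match second with
    | [] => count  -- Python: IndexError here; excluded by Pre_solve
    | y :: ys =>
      if x = y then solveLoopA fuel rest ys (count + 1)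
      else solveLoopA fuel (rest ++ [x]) (y :: ys) (count + 1)

def solve (first : List Int) (second : List Int) : Int :=
  solveLoopA (first.length * first.length + 1) first second 0

-- ===== PORT B =====
def solveLoopB (q : List Int) (second : List Int) (j : Nat) (count : Int) : Int :=
  if _hq : q = [] then count
  else
    match second[j]? with
    | none => count  -- Python: IndexError; excluded by Pre_solve
    | some t =>
      match h : PySem.List.index? q t with
      | none => count  -- Python: ValueError; excluded by Pre_solve
      | some i => solveLoopB (q.drop (i + 1) ++ q.take i) second (j + 1) (count + (i : Int) + 1)
termination_by q.length
decreasing_by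
  obtain ⟨hk, -, -⟩ := PySem.List.getElem_of_index?_eq_some h
  simp only [List.length_append, List.length_drop, List.length_take]
  omega

def solve_alt (first : List Int) (second : List Int) : Int :=
  solveLoopB first second 0 0

-- ===== PRECONDITION & SPEC =====
-- Pre_solve = exactly the inputs on which Python A terminates: `first` must be a multiset
-- permutation of the first `first.length` elements of `second` (otherwise A loops forever,
-- or raises IndexError once `second` runs out).
def Pre_solve (first : List Int) (second : List Int) : Prop :=
  first.Perm (second.take first.length)
instance (first : List Int) (second : List Int) : Decidable (Pre_solve first second) := by
  unfold Pre_solve; infer_instance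

def pvWitness_solve : List Int × List Int := ([1, 2, 3], [2, 3, 1])

def Spec_solve (first : List Int) (second : List Int) (out : Int) : Prop := out = solve_alt first second
instance (first : List Int) (second : List Int) (out : Int) : Decidable (Spec_solve first second out) := by unfold Spec_solve; infer_instance

-- ===== CLAIM (what is proved, stated in full; the proofs are below) =====
def Claim_equal_solve : Prop := ∀ (first : List Int) (second : List Int), Dom_solve first second → Pre_solve first second → Spec_solve first second (solve first second)

-- ===== LEMMAS AND PROOFS =====

-- One whole "find the next target" phase of A: rotating past `a` (none of which equals the
-- target t) and then matching t costs a.length + 1 iterations and leaves the queue b ++ a.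
lemma solveLoopA_phase : ∀ (a b ys : List Int) (t : Int) (count : Int) (fuel : Nat),
    t ∉ a → a.length + 1 ≤ fuel →
    solveLoopA fuel (a ++ t :: b) (t :: ys) count
      = solveLoopA (fuel - (a.length + 1)) (b ++ a) ys (count + (a.length : Int) + 1) := by
  intro a
  induction a with
  | nil =>
    intro b ys t count fuel _ hfuel
    obtain ⟨f, rfl⟩ : ∃ f, fuel = f + 1 := ⟨fuel - 1, by omega⟩
    simp [solveLoopA]
  | cons x a' ih =>
    intro b ys t count fuel hmem hfuel
    obtain ⟨f, rfl⟩ : ∃ f, fuel = f + 1 := ⟨fuel - 1, by omega⟩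
    have hxt : ¬ (x = t) := by simp at hmem; tauto
    have hta' : t ∉ a' := by simp at hmem; tauto
    show solveLoopA (f + 1) (x :: (a' ++ t :: b)) (t :: ys) count = _
    rw [solveLoopA]
    simp only [hxt, ite_false]
    have hassoc : (a' ++ t :: b) ++ [x] = a' ++ t :: (b ++ [x]) := by simp
    rw [hassoc, ih (b ++ [x]) ys t (count + 1) f hta' (by simp at hfuel ⊢; omega)]
    have h1 : (b ++ [x]) ++ a' = b ++ (x :: a') := by simp
    have h2 : f - (a'.length + 1) = (f + 1) - ((x :: a').length + 1) := by
      simp only [List.length_cons]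
      omega
    have hc : (count + 1) + ((a'.length : Int)) + 1 = count + (((x :: a').length : Int)) + 1 := by
      simp only [List.length_cons]
      push_cast
      ring
    rw [h1, ← h2, hc]

lemma main_equiv : ∀ (n : Nat) (q s : List Int) (j : Nat) (count : Int) (fuel : Nat),
    q.length = n → n * n ≤ fuel → q.Perm ((s.drop j).take n) →
    solveLoopA fuel q (s.drop j) count = solveLoopB q s j count := by
  intro n
  induction n with
  | zero =>
    intro q s j count fuel hlen _ _
    have : q = [] := List.eq_nil_of_length_eq_zero hlen
    subst this
    rw [solveLoopB]
    simp
    cases fuel <;> simp [solveLoopA]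
  | succ n ih =>
    intro q s j count fuel hlen hfuel hperm
    have hq : q ≠ [] := by intro h; subst h; simp at hlen
    -- the drop is long enough: its take has the same length as q
    have hlen2 : ((s.drop j).take (n + 1)).length = n + 1 := by
      rw [← hperm.length_eq, hlen]
    have hdroplen : n + 1 ≤ (s.drop j).length := by
      by_contra hcon
      rw [List.length_take] at hlen2
      omega
    obtain ⟨t, rest, hdrop⟩ : ∃ t rest, s.drop j = t :: rest := by
      cases hd : s.drop j with
      | nil => rw [hd] at hdroplen; simp at hdroplen
      | cons t rest => exact ⟨t, rest, rfl⟩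
    have hrest : rest = s.drop (j + 1) := by
      have := @List.tail_drop Int s j
      rw [hdrop] at this
      simpa using this
    have hsj : s[j]? = some t := by
      have : (s.drop j)[0]? = s[j + 0]? := @List.getElem?_drop Int s j 0
      rw [hdrop] at this
      simpa using this.symm
    have htq : t ∈ q := by
      rw [hperm.mem_iff, hdrop]
      simp
    obtain ⟨i, hidx⟩ : ∃ i, PySem.List.index? q t = some i := by
      have := (PySem.List.index?_isSome_iff (xs := q) (v := t)).2 htq
      exact Option.isSome_iff_exists.mp this
    obtain ⟨a, b, hqab, hai, hta⟩ := (PySem.List.index?_eq_some_iff q t i).1 hidx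
    have hilen : i < q.length := by
      subst hqab; simp; omega
    have hfuel1 : a.length + 1 ≤ fuel := by
      have hsq : (n + 1) * (n + 1) = n * n + 2 * n + 1 := by ring
      have hale : a.length ≤ n := by
        have := hlen; rw [hqab] at this; simp at this; omega
      omega
    have hdropq : q.drop (i + 1) = b := by
      subst hqab; rw [← hai]
      simp
    have htakeq : q.take i = a := by
      subst hqab; rw [← hai]
      simp
    have hlen' : (b ++ a).length = n := by
      have := hlen; rw [hqab] at this; simp at this ⊢; omega
    have hfuel' : n * n ≤ fuel - (a.length + 1) := by
      have hsq : (n + 1) * (n + 1) = n * n + 2 * n + 1 := by ring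
      have hale : a.length ≤ n := by rw [hai]; omega
      omega
    have hperm' : (b ++ a).Perm ((s.drop (j + 1)).take n) := by
      have h1 : (a ++ t :: b).Perm (t :: (a ++ b)) := List.perm_middle
      have h2 : (a ++ t :: b).Perm (t :: (s.drop (j + 1)).take n) := by
        rw [← hqab]
        rw [hdrop, hrest] at hperm
        simpa using hperm
      have h4 : (a ++ b).Perm ((s.drop (j + 1)).take n) := (h1.symm.trans h2).cons_inv
      exact (List.perm_append_comm).trans h4
    -- compute the A side down to the recursive configuration
    rw [hdrop, hqab, solveLoopA_phase a b rest t count fuel hta hfuel1]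
    rw [← hqab]
    rw [hrest]
    -- unfold B one step and match it
    conv_rhs => rw [solveLoopB]
    simp only [hq, dite_false, hsj]
    split
    · rename_i heq
      rw [hidx] at heq
      cases heq
    · rename_i i1 heq
      rw [hidx] at heq
      have hi1 : i1 = i := by injection heq with h'; exact h'.symm
      subst i1
      rw [hdropq, htakeq]
      rw [← ih (b ++ a) s (j + 1) (count + (i : Int) + 1) (fuel - (a.length + 1)) hlen' hfuel' hperm']
      congr 2
      rw [hai]

-- ===== VERDICT (by name: the statement is the Claim_ definition above) =====
theorem solve_spec : Claim_equal_solve := by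
  intro first second _ hpre
  unfold Spec_solve solve solve_alt
  have := main_equiv first.length first second 0 0 (first.length * first.length + 1)
    rfl (by omega) (by simpa using hpre)
  simpa using this
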